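-- pv_equiv track=rewrite | github.com/SeojinYoon/Seojin_commonTool | Module/sj_string.py | str_join
-- ===== SOURCE A (Python) =====
-- def str_join(strs, delimiter = "_"):
--     """
--     join string
--
--     :param strs: list of string
--     :param delimiter: delimiter
--
--     return: combination string
--     """
--     strs = list(filter(lambda str: str != "", strs))
--     strs = list(filter(lambda str: str != None, strs))
--
--     if len(strs) == 0:
--         return ""
--     elif len(strs) == 1:
--         return str(strs[0])
--     else:
--         return strs[0] + delimiter + str_join(strs[1:], delimiter)
-- ===== SOURCE B (Python) =====
-- def str_join(strs, delimiter="_"):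
--     return delimiter.join(x for x in strs if x != "" and x is not None)
-- ===== Notes on version B (the rewrite author's own statement) =====
-- stated objective: simpler
-- what changed: Replaces A's filter-then-recursive slicing join (re-filtering on every recursive call, quadratic in list size from strs[1:] copies) with a single generator filter passed to str.join.
import Mathlib
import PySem

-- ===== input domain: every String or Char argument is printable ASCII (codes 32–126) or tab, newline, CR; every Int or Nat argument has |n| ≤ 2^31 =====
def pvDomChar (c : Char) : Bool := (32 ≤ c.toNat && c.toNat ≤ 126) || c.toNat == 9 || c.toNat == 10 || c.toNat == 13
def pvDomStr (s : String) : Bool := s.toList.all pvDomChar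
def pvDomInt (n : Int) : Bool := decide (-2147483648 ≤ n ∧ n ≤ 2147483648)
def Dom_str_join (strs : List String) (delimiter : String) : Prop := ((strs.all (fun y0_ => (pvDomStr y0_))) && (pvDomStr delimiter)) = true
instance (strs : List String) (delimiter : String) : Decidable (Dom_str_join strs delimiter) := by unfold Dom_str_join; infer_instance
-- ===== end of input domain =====

-- B replaces A's recursive slice-and-refilter join with one filter passed to a library join; equivalence is on the return value (no mutation involved).

-- ===== PORT A =====
def str_join (strs : List String) (delimiter : String) : String :=
  -- strs = list(filter(lambda str: str != "", strs))
  -- strs = list(filter(lambda str: str != None, strs)) — on List String every element is a string, so this filter keeps everything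
  match _h : (strs.filter (fun x => x ≠ "")).filter (fun _ => true) with
  | [] => ""                                          -- len == 0
  | [x] => x                                          -- len == 1: str(strs[0]) is the identity on a string
  | x :: rest => x ++ delimiter ++ str_join rest delimiter   -- strs[0] + delimiter + str_join(strs[1:], delimiter)
termination_by strs.length
decreasing_by
  have h1 := List.length_filter_le (fun _ => true) (strs.filter (fun x => decide (x ≠ "")))
  have h2 := List.length_filter_le (fun x => decide (x ≠ "")) strs
  rw [_h] at h1
  simp only [List.length_cons] at h1
  omega

-- ===== PORT B =====
def str_join_alt (strs : List String) (delimiter : String) : String :=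
  PySem.Str.join delimiter (strs.filter (fun x => x ≠ ""))

-- ===== PRECONDITION & SPEC =====
def Spec_str_join (strs : List String) (delimiter : String) (out : String) : Prop := out = str_join_alt strs delimiter
instance (strs : List String) (delimiter : String) (out : String) : Decidable (Spec_str_join strs delimiter out) := by unfold Spec_str_join; infer_instance

-- ===== CLAIM (what is proved, stated in full; the proofs are below) =====
def Claim_equal_str_join : Prop := ∀ (strs : List String) (delimiter : String), Dom_str_join strs delimiter → Spec_str_join strs delimiter (str_join strs delimiter)

-- ===== LEMMAS AND PROOFS =====
lemma str_join_cons (d x y : String) (t : List String) :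
    PySem.Str.join d (x :: y :: t) = x ++ d ++ PySem.Str.join d (y :: t) := by
  have h : (PySem.Str.join d (x :: y :: t)).toList = (x ++ d ++ PySem.Str.join d (y :: t)).toList := by
    simp [PySem.Str.toList_join, PySem.Chars.join_cons_cons]
  exact String.toList_inj.mp h

lemma join_aux (d : String) : ∀ (n : Nat) (l : List String), l.length ≤ n →
    str_join l d = PySem.Str.join d (l.filter (fun x => x ≠ "")) := by
  intro n
  induction n with
  | zero =>
    intro l hl
    have : l = [] := List.eq_nil_of_length_eq_zero (Nat.le_zero.mp hl)
    subst this
    rw [str_join.eq_def]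
    simp [PySem.Str.join, PySem.Chars.join, List.intercalate]
  | succ n ih =>
    intro l hl
    have hmem : ∀ x ∈ l.filter (fun x => decide (x ≠ "")), x ≠ "" := by
      intro x hx; simpa using List.of_mem_filter hx
    rw [str_join.eq_def]
    split
    next hF =>
      simp only [List.filter_true] at hF
      simp only [ne_eq, decide_not] at hF ⊢
      simp [hF, PySem.Str.join, PySem.Chars.join, List.intercalate]
    next x hF =>
      simp only [List.filter_true] at hF
      have h1 : (PySem.Str.join d [x]).toList = x.toList := by
        simp [PySem.Str.toList_join, PySem.Chars.join, List.intercalate]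
      rw [hF]
      exact (String.toList_inj.mp h1).symm
    next x rest hrest hF =>
      simp only [List.filter_true] at hF
      obtain ⟨y, t, rfl⟩ := List.exists_cons_of_ne_nil (fun h => hrest h)
      rw [hF]
      have hlen : (y :: t).length ≤ n := by
        have := List.length_filter_le (fun x => decide (x ≠ "")) l
        rw [hF] at this; simp at this ⊢; omega
      have hfix : (y :: t).filter (fun x => decide (x ≠ "")) = y :: t := by
        apply List.filter_eq_self.mpr
        intro z hz
        have : z ∈ l.filter (fun x => decide (x ≠ "")) := by
          rw [hF]; exact List.mem_cons_of_mem _ hz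
        simpa using hmem z this
      have hih := ih (y :: t) hlen
      rw [hfix] at hih
      rw [hih, str_join_cons]

-- ===== VERDICT (by name: the statement is the Claim_ definition above) =====
theorem str_join_spec : Claim_equal_str_join := by
  intro strs delimiter _
  unfold Spec_str_join str_join_alt
  exact join_aux delimiter strs.length strs le_rfl
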